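-- pv_equiv track=rewrite | github.com/dneff/adventofcode | python/2016/16/solution2.py | generate_dragon_curve_data
-- ===== SOURCE A (Python) =====
-- def generate_dragon_curve_data(initial_state, disk_length):
--     """
--     Generate data using the modified dragon curve algorithm to fill a disk.
--
--     The algorithm repeatedly applies these steps until enough data is generated:
--     1. Take current data as 'a'
--     2. Make a copy 'b' by reversing 'a' and flipping all bits (0→1, 1→0)
--     3. Concatenate: a + '0' + b
--
--     Args:
--         initial_state: Starting binary string (e.g., "10000")
--         disk_length: Target length of data needed to fill the disk
--
--     Returns:
--         Binary string of exactly disk_length characters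
--     """
--     data = initial_state
--     while len(data) < disk_length:
--         # Apply dragon curve: a + '0' + reversed_inverted(a)
--         a = data
--         b = a[::-1]  # Reverse the string
--         # Invert all bits: 0→1, 1→0 (using intermediate '2' to avoid conflicts)
--         b = b.replace('1', '2').replace('0', '1').replace('2', '0')
--         data = a + "0" + b
--
--     # Truncate to exact disk length
--     return data[:disk_length]
-- ===== SOURCE B (Python) =====
-- def generate_dragon_curve_data(initial_state, disk_length):
--     """Per-position closed form: each character of the grown string is computed
--     directly from its index (paperfolding sequence at separator positions,
--     seed or bit-flipped mirrored seed inside blocks) instead of iterative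
--     string concatenation."""
--     L = len(initial_state)
--
--     def paperfold(k):
--         # k-th term (1-based) of the regular paperfolding (dragon) sequence
--         while k % 2 == 0:
--             k //= 2
--         return '0' if k % 4 == 1 else '1'
--
--     def bit(i):
--         if (i + 1) % (L + 1) == 0:
--             return paperfold((i + 1) // (L + 1))
--         b, j = divmod(i, L + 1)
--         if b % 2 == 0:
--             return initial_state[j]
--         c = initial_state[L - 1 - j]
--         return '1' if c == '0' else '0' if c == '1' else c
--
--     n = L
--     while n < disk_length:
--         n = 2 * n + 1
--     return ''.join(bit(i) for i in range(n))[:disk_length]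
-- ===== Notes on version B (the rewrite author's own statement) =====
-- stated objective: alternative
-- what changed: B computes each character of the grown string directly from its index by a closed-form rule (paperfolding/dragon sequence at separator positions, plain or bit-flipped mirrored seed inside blocks) instead of A's iterative reverse-invert-concatenate growth.
-- intended difference: On seeds containing the literal character '2' with disk_length large enough to reach the first inverted copy of such a '2' (disk_length > 2*len - p for a '2' at index p), A's '1'→'2'→'0' replace-chain trick also maps the seed's own '2' characters to '0' and returns '0' at those positions, while B returns '2': the documented rule flips only the bits 0↔1 and leaves other characters unchanged. — e.g. on generate_dragon_curve_data("2", 3): A returns "200", B returns "202"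
import Mathlib
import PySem

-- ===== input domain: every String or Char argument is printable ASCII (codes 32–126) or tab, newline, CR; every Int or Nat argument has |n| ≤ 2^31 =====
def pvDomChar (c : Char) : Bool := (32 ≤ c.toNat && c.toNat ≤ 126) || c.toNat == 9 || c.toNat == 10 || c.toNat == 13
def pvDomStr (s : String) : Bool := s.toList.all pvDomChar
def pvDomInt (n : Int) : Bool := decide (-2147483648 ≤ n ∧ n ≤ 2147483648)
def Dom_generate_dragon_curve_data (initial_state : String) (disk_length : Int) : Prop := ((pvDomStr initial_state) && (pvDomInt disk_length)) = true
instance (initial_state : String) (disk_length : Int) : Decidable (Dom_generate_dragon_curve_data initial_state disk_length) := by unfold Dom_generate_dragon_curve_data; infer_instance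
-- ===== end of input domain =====

-- B replaces A's repeated grow-and-concatenate loop by a per-index closed form
-- (paperfolding sequence at separators, plain/flipped seed inside blocks); an
-- alternative algorithm of similar cost, not claimed faster.

-- ===== PORT A =====

-- one grow step: data -> a + "0" + reversed-and-'1','2','0'-replaced a  (A's loop body, step for step)
def pvGrowA (data : List Char) : List Char :=
  let a := data
  let b := (PySem.List.slice? a none none (-1)).getD []   -- a[::-1]
  let b := PySem.Chars.replace b ['1'] ['2']
  let b := PySem.Chars.replace b ['0'] ['1']
  let b := PySem.Chars.replace b ['2'] ['0']
  a ++ ['0'] ++ b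

-- A's while loop; the fuel (disk_length - len).toNat is a totality guard only:
-- each iteration lengthens data by at least 1, so the fuel never runs out
def pvLoopA : Nat → Int → List Char → List Char
  | 0, _, data => data
  | fuel+1, d, data => if (data.length : Int) < d then pvLoopA fuel d (pvGrowA data) else data

def generate_dragon_curve_data (initial_state : String) (disk_length : Int) : String :=
  let data := initial_state.toList
  let res := pvLoopA (disk_length - (data.length : Int)).toNat disk_length data
  String.ofList (PySem.List.slice res none (some disk_length))   -- data[:disk_length]

-- ===== PORT B =====

-- B's paperfold(k): strip factors of 2, then read k mod 4 (fuel = k is a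
-- totality guard only; the Python loop is entered with k ≥ 1 always)
def pvPfoldGo : Nat → Nat → Char
  | 0, k => if k % 4 = 1 then '0' else '1'
  | fuel+1, k => if k % 2 = 0 then pvPfoldGo fuel (k / 2) else if k % 4 = 1 then '0' else '1'

def pvPfold (k : Nat) : Char := pvPfoldGo k k

-- B's bit(i): the character at index i of the fully grown string
def pvBit (s : List Char) (i : Nat) : Char :=
  let L := s.length
  if (i + 1) % (L + 1) = 0 then pvPfold ((i + 1) / (L + 1))
  else
    let b := i / (L + 1)
    let j := i % (L + 1)
    if b % 2 = 0 then s.getD j ' '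
    else
      let c := s.getD (L - 1 - j) ' '
      if c = '0' then '1' else if c = '1' then '0' else c

-- B's length loop n -> 2n+1 (same fuel guard as A's loop)
def pvGrowLen : Nat → Int → Nat → Nat
  | 0, _, n => n
  | fuel+1, d, n => if (n : Int) < d then pvGrowLen fuel d (2*n+1) else n

def generate_dragon_curve_data_alt (initial_state : String) (disk_length : Int) : String :=
  let s := initial_state.toList
  let n := pvGrowLen (disk_length - (s.length : Int)).toNat disk_length s.length
  String.ofList (PySem.List.slice ((List.range n).map (pvBit s)) none (some disk_length))

-- ===== PRECONDITION & SPEC =====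

-- On seeds containing the literal character '2', once disk_length is large enough that the
-- output reaches the first inverted copy of a '2' (disk_length > 2*len - p for a '2' at
-- index p), A's '1'→'2'→'0' replace-chain trick maps the seed's own '2' characters to '0'
-- in inverted copies, so A returns '0' there while B returns the intended value '2':
-- the documented rule flips only the bits 0↔1 and leaves other characters unchanged.
-- D-side helper: one left-to-right pass; at seed position p the test is
-- 2*len - p < disk_length, carried as the counter t = 2*len - disk_length - p
def pvDGo : List Char → Int → Bool
  | [], _ => false
  | c :: cs, t => (c == '2' && decide (t < 0)) || pvDGo cs (t - 1)

def D_generate_dragon_curve_data (initial_state : String) (disk_length : Int) : Prop :=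
  pvDGo initial_state.toList (2 * (initial_state.toList.length : Int) - disk_length) = true

instance (initial_state : String) (disk_length : Int) : Decidable (D_generate_dragon_curve_data initial_state disk_length) := by
  unfold D_generate_dragon_curve_data; infer_instance

def Spec_generate_dragon_curve_data (initial_state : String) (disk_length : Int) (out : String) : Prop :=
  ¬ D_generate_dragon_curve_data initial_state disk_length → out = generate_dragon_curve_data_alt initial_state disk_length

instance (initial_state : String) (disk_length : Int) (out : String) : Decidable (Spec_generate_dragon_curve_data initial_state disk_length out) := by
  unfold Spec_generate_dragon_curve_data; infer_instance

def pvDiffWitness_generate_dragon_curve_data : String × Int := ("2", 3)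
def pvDiffWitnessOut_generate_dragon_curve_data : String × String := ("200", "202")

-- ===== CLAIM =====

def Claim_unchanged_generate_dragon_curve_data : Prop :=
  ∀ (initial_state : String) (disk_length : Int), Dom_generate_dragon_curve_data initial_state disk_length →
    Spec_generate_dragon_curve_data initial_state disk_length (generate_dragon_curve_data initial_state disk_length)

def Claim_changed_generate_dragon_curve_data : Prop :=
  Dom_generate_dragon_curve_data (pvDiffWitness_generate_dragon_curve_data.1) (pvDiffWitness_generate_dragon_curve_data.2) ∧
  D_generate_dragon_curve_data (pvDiffWitness_generate_dragon_curve_data.1) (pvDiffWitness_generate_dragon_curve_data.2) ∧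
  generate_dragon_curve_data (pvDiffWitness_generate_dragon_curve_data.1) (pvDiffWitness_generate_dragon_curve_data.2) = pvDiffWitnessOut_generate_dragon_curve_data.1 ∧
  generate_dragon_curve_data_alt (pvDiffWitness_generate_dragon_curve_data.1) (pvDiffWitness_generate_dragon_curve_data.2) = pvDiffWitnessOut_generate_dragon_curve_data.2 ∧
  pvDiffWitnessOut_generate_dragon_curve_data.1 ≠ pvDiffWitnessOut_generate_dragon_curve_data.2

-- ===== LEMMAS AND PROOFS =====

def pvInv (c : Char) : Char := if c = '0' then '1' else if c = '1' then '0' else c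
def pvMA (c : Char) : Char := if c = '1' then '0' else if c = '0' then '1' else if c = '2' then '0' else c

theorem pv_replace_go_single (o n : Char) :
    ∀ (fuel : Nat) (l acc : List Char), l.length ≤ fuel →
      PySem.Chars.replace.go [o] [n] fuel l acc = acc.reverse ++ l.map (fun c => if c = o then n else c) := by
  intro fuel
  induction fuel with
  | zero =>
    intro l acc h
    have hl : l = [] := List.eq_nil_of_length_eq_zero (Nat.le_zero.mp h)
    subst hl
    simp [PySem.Chars.replace.go]
  | succ f ih =>
    intro l acc h
    cases l with
    | nil => simp [PySem.Chars.replace.go]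
    | cons c t =>
      simp only [PySem.Chars.replace.go]
      by_cases hc : c = o
      · have hp : List.isPrefixOf [o] (c :: t) = true := by simp [List.isPrefixOf, hc]
        rw [if_pos hp, ih _ _ (by simpa using Nat.le_of_succ_le_succ h)]
        simp [hc]
      · have hp : List.isPrefixOf [o] (c :: t) = false := by
          simp only [List.isPrefixOf, Bool.and_true]
          exact decide_eq_false fun h' => hc h'.symm
        rw [if_neg (by simp [hp]), ih _ _ (Nat.le_of_succ_le_succ h)]
        simp [hc]

theorem pv_replace_single (o n : Char) (l : List Char) :
    PySem.Chars.replace l [o] [n] = l.map (fun c => if c = o then n else c) := by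
  simp [PySem.Chars.replace]
  rw [pv_replace_go_single o n l.length l [] le_rfl]
  simp

theorem pv_growA_eq (l : List Char) : pvGrowA l = l ++ '0' :: (l.reverse.map pvMA) := by
  simp only [pvGrowA, PySem.List.slice?_none_none_neg_one, Option.getD_some,
    pv_replace_single, List.map_map]
  rw [List.append_assoc]
  congr 1
  simp only [List.singleton_append, List.cons.injEq, true_and]
  apply List.map_congr_left
  intro c _
  simp only [Function.comp, pvMA]
  by_cases h1 : c = '1' <;> by_cases h0 : c = '0' <;> by_cases h2 : c = '2' <;>
    simp_all

theorem pv_inv_invol (c : Char) : pvInv (pvInv c) = c := by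
  simp only [pvInv]
  split_ifs <;> simp_all

theorem pv_mA_eq_inv (c : Char) (h : c ≠ '2') : pvMA c = pvInv c := by
  simp only [pvMA, pvInv]
  split_ifs <;> simp_all

theorem pv_inv_ne_two (c : Char) (h : c ≠ '2') : pvInv c ≠ '2' := by
  simp only [pvInv]
  split_ifs <;> simp_all

theorem pv_pfoldGo_congr : ∀ (f1 : Nat), ∀ (f2 k : Nat), 1 ≤ k → k ≤ f1 → k ≤ f2 →
    pvPfoldGo f1 k = pvPfoldGo f2 k := by
  intro f1
  induction f1 with
  | zero => intro f2 k h1 h2 _; omega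
  | succ f ih =>
    intro f2 k h1 h2 h3
    cases f2 with
    | zero => omega
    | succ g =>
      simp only [pvPfoldGo]
      by_cases he : k % 2 = 0
      · rw [if_pos he, if_pos he]
        exact ih g (k / 2) (by omega) (by omega) (by omega)
      · rw [if_neg he, if_neg he]

theorem pv_pfold_even (m : Nat) (h : 1 ≤ m) : pvPfold (2 * m) = pvPfold m := by
  have h2 : 2 * m = (2 * m - 1) + 1 := by omega
  rw [pvPfold, h2]
  simp only [pvPfoldGo]
  rw [if_pos (by omega : (2 * m - 1 + 1) % 2 = 0)]
  have : (2 * m - 1 + 1) / 2 = m := by omega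
  rw [this]
  exact pv_pfoldGo_congr (2 * m - 1) m m h (by omega) le_rfl

theorem pv_pfold_odd (k : Nat) (h : k % 2 = 1) : pvPfold k = if k % 4 = 1 then '0' else '1' := by
  have h1 : 1 ≤ k := by omega
  have h2 : k = (k - 1) + 1 := by omega
  rw [pvPfold, h2]
  simp only [pvPfoldGo]
  rw [if_neg (by omega : ¬ ((k - 1 + 1) % 2 = 0))]

theorem pv_pfold_two_pow (k : Nat) : pvPfold (2 ^ k) = '0' := by
  induction k with
  | zero => decide
  | succ n ih => rw [pow_succ, mul_comm, pv_pfold_even _ (Nat.one_le_two_pow), ih]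

theorem pv_pfold_flip : ∀ (n : Nat), ∀ (j : Nat), 1 ≤ j → j < 2 ^ n →
    pvPfold (2 ^ (n + 1) - j) = pvInv (pvPfold j) := by
  intro n
  induction n with
  | zero => intro j h1 h2; omega
  | succ m ih =>
    intro j h1 h2
    by_cases he : j % 2 = 0
    · obtain ⟨t, rfl⟩ : ∃ t, j = 2 * t := ⟨j / 2, by omega⟩
      have ht1 : 1 ≤ t := by omega
      have ht2 : t < 2 ^ m := by rw [pow_succ] at h2; omega
      have hsub : 2 ^ (m + 1 + 1) - 2 * t = 2 * (2 ^ (m + 1) - t) := by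
        rw [pow_succ 2 (m+1)]; omega
      rw [hsub, pv_pfold_even _ (by have := Nat.one_le_two_pow (n := m + 1); omega),
        pv_pfold_even _ ht1]
      exact ih t ht1 ht2
    · have ho : j % 2 = 1 := by omega
      have h4 : (4 : Nat) ∣ 2 ^ (m + 1 + 1) := by
        have : 2 ^ (m + 1 + 1) = 4 * 2 ^ m := by ring
        exact ⟨2 ^ m, this⟩
      obtain ⟨q, hq⟩ := h4
      have hlt : j < 2 ^ (m + 1 + 1) := lt_trans h2 (by exact Nat.pow_lt_pow_right (by omega) (by omega))
      have ho2 : (2 ^ (m + 1 + 1) - j) % 2 = 1 := by omega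
      rw [pv_pfold_odd _ ho, pv_pfold_odd _ ho2]
      have : (2 ^ (m + 1 + 1) - j) % 4 = (4 - j % 4) % 4 := by omega
      rw [this]
      rcases (by omega : j % 4 = 1 ∨ j % 4 = 3) with h | h <;> simp [h, pvInv]

theorem pv_pfold_binary (k : Nat) : pvPfold k = '0' ∨ pvPfold k = '1' := by
  induction k using Nat.strong_induction_on with
  | _ k ih =>
    by_cases h0 : k = 0
    · subst h0; right; decide
    by_cases he : k % 2 = 0
    · have hk : k = 2 * (k / 2) := by omega
      rw [hk, pv_pfold_even _ (by omega)]
      exact ih (k / 2) (by omega)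
    · rw [pv_pfold_odd k (by omega)]; split_ifs <;> simp

theorem pv_bit_else (s : List Char) (i : Nat) (h : ¬ (i + 1) % (s.length + 1) = 0) :
    pvBit s i = (if (i / (s.length + 1)) % 2 = 0 then s.getD (i % (s.length + 1)) ' '
      else pvInv (s.getD (s.length - 1 - i % (s.length + 1)) ' ')) := by
  rw [pvBit, if_neg h]
  rfl

theorem pv_bit_mirror (s : List Char) (k t : Nat)
    (ht : t + 2 ≤ (s.length + 1) * 2 ^ k) :
    pvBit s ((s.length + 1) * 2 ^ k + t) = pvInv (pvBit s ((s.length + 1) * 2 ^ k - 2 - t)) := by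
  set L := s.length with hL
  set M := L + 1 with hM
  set N := M * 2 ^ k with hN
  have hM0 : 0 < M := by omega
  have hN2 : M * 2 ^ (k + 1) = 2 * N := by rw [hN, pow_succ]; ring
  set i := N + t with hi
  set i' := N - 2 - t with hi'
  have hsum : (i + 1) + (i' + 1) = 2 * N := by omega
  by_cases hm : (i + 1) % M = 0
  · -- both indices are separator positions
    obtain ⟨q, hq⟩ : M ∣ i + 1 := Nat.dvd_of_mod_eq_zero hm
    have hdvd2N : M ∣ 2 * N := ⟨2 ^ (k + 1), hN2.symm⟩
    have hdvd' : M ∣ i' + 1 := by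
      have h1 : M ∣ (i + 1) + (i' + 1) := hsum ▸ hdvd2N
      have h2 := Nat.dvd_sub h1 ⟨q, hq⟩
      have h3 : (i + 1) + (i' + 1) - (i + 1) = i' + 1 := by omega
      rwa [h3] at h2
    obtain ⟨q', hq'⟩ := hdvd'
    have hm' : (i' + 1) % M = 0 := by rw [hq']; exact Nat.mul_mod_right M q'
    have hqq : q + q' = 2 ^ (k + 1) := by
      apply Nat.eq_of_mul_eq_mul_left hM0
      calc M * (q + q') = (M * q) + (M * q') := by ring
        _ = (i + 1) + (i' + 1) := by rw [← hq, ← hq']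
        _ = 2 * N := hsum
        _ = M * 2 ^ (k + 1) := hN2.symm
    have hq'1 : 1 ≤ q' := by
      rcases Nat.eq_zero_or_pos q' with h0 | h1
      · rw [h0, Nat.mul_zero] at hq'; omega
      · exact h1
    have hq'lt : q' < 2 ^ k := by
      have hi'lt : M * q' < M * 2 ^ k := by rw [← hq', ← hN]; omega
      exact Nat.lt_of_mul_lt_mul_left hi'lt
    rw [pvBit, pvBit, if_pos hm, if_pos hm']
    rw [hq, hq', Nat.mul_div_cancel_left _ hM0, Nat.mul_div_cancel_left _ hM0]
    have hqe : q = 2 ^ (k + 1) - q' := by omega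
    rw [hqe]
    exact pv_pfold_flip k q' hq'1 hq'lt
  · -- both indices are non-separator positions
    set b := i / M with hb
    set j := i % M with hj
    set b' := i' / M with hb'
    set j' := i' % M with hj'
    have hdec : b * M + j = i := by rw [hb, hj, Nat.mul_comm]; exact Nat.div_add_mod i M
    have hdec' : b' * M + j' = i' := by rw [hb', hj', Nat.mul_comm]; exact Nat.div_add_mod i' M
    have hjM : j < M := Nat.mod_lt _ hM0
    have hj'M : j' < M := Nat.mod_lt _ hM0
    have hmod : (i + 1) % M = (j + 1) % M := by
      rw [show i + 1 = j + 1 + b * M by omega]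
      exact Nat.add_mul_mod_self_right _ _ _
    have hmod' : (i' + 1) % M = (j' + 1) % M := by
      rw [show i' + 1 = j' + 1 + b' * M by omega]
      exact Nat.add_mul_mod_self_right _ _ _
    have hsmod : ((i + 1) + (i' + 1)) % M = 0 := by
      rw [hsum, ← hN2]
      exact Nat.mul_mod_right M _
    have hjj2 : (j + 1 + (j' + 1)) % M = 0 := by
      calc (j + 1 + (j' + 1)) % M = ((j + 1) % M + (j' + 1) % M) % M := by rw [Nat.add_mod]
        _ = ((i + 1) % M + (i' + 1) % M) % M := by rw [hmod, hmod']
        _ = ((i + 1) + (i' + 1)) % M := by rw [← Nat.add_mod]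
        _ = 0 := hsmod
    have hjne : j + 1 ≠ M := by
      intro h
      apply hm
      rw [hmod, h, Nat.mod_self]
    have hjj : j + j' + 2 = M := by
      obtain ⟨c, hc⟩ := Nat.dvd_of_mod_eq_zero hjj2
      have hcge : 1 ≤ c := by
        rcases Nat.eq_zero_or_pos c with h0 | h1
        · rw [h0, Nat.mul_zero] at hc; omega
        · exact h1
      have hclt : c < 3 := by
        by_contra hcge3
        have : M * 3 ≤ M * c := Nat.mul_le_mul_left M (by omega)
        omega
      have hc2 : c ≠ 2 := by
        intro h2
        rw [h2] at hc
        have : j + 1 = M ∧ j' + 1 = M := by omega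
        exact hjne this.1
      have : c = 1 := by omega
      rw [this, Nat.mul_one] at hc
      omega
    have hm' : ¬ (i' + 1) % M = 0 := by
      rw [hmod', Nat.mod_eq_of_lt (by omega : j' + 1 < M)]
      omega
    have hbb : b + b' + 1 = 2 ^ (k + 1) := by
      apply Nat.eq_of_mul_eq_mul_left hM0
      calc M * (b + b' + 1) = b * M + j + 1 + (b' * M + j' + 1) := by
            rw [show M * (b + b' + 1) = b * M + b' * M + M by ring]; omega
        _ = (i + 1) + (i' + 1) := by rw [hdec, hdec']
        _ = 2 * N := hsum
        _ = M * 2 ^ (k + 1) := hN2.symm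
    have hpow : 1 ≤ 2 ^ (k + 1) := Nat.one_le_two_pow
    rw [pv_bit_else s i hm, pv_bit_else s i' hm']
    rw [← hM, ← hb, ← hj, ← hb', ← hj']
    have hj'eq : j' = L - 1 - j := by omega
    have hjeq : L - 1 - j' = j := by omega
    by_cases hbe : b % 2 = 0
    · have hbo : ¬ b' % 2 = 0 := by omega
      rw [if_pos hbe, if_neg hbo, hjeq, pv_inv_invol]
    · have hbo : b' % 2 = 0 := by omega
      rw [if_neg hbe, if_pos hbo, hj'eq]

def pvF (s : List Char) (n : Nat) : List Char := (List.range n).map (pvBit s)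

theorem pv_F_length (s : List Char) (n : Nat) : (pvF s n).length = n := by
  simp [pvF]

theorem pv_F_getElem (s : List Char) (n i : Nat) (h : i < n) :
    (pvF s n)[i]'(by simpa [pvF] using h) = pvBit s i := by
  simp [pvF]

theorem pv_bit_lt (s : List Char) (i : Nat) (h : i < s.length) :
    pvBit s i = s.getD i ' ' := by
  rw [pvBit]
  have h1 : (i + 1) % (s.length + 1) = i + 1 := Nat.mod_eq_of_lt (by omega)
  rw [if_neg (by omega)]
  have h2 : i / (s.length + 1) = 0 := Nat.div_eq_of_lt (by omega)
  have h3 : i % (s.length + 1) = i := Nat.mod_eq_of_lt (by omega)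
  simp [h2, h3]

theorem pv_F_seed (s : List Char) : pvF s s.length = s := by
  apply List.ext_getElem
  · simp [pv_F_length]
  · intro i h1 h2
    rw [pv_F_getElem s s.length i (by simpa [pv_F_length] using h1),
      pv_bit_lt s i h2, List.getD_eq_getElem s ' ' h2]

theorem pv_bit_mid (s : List Char) (k : Nat) :
    pvBit s ((s.length + 1) * 2 ^ k - 1) = '0' := by
  have hpos : 1 ≤ (s.length + 1) * 2 ^ k :=
    Nat.one_le_iff_ne_zero.mpr (by positivity)
  rw [pvBit]
  have he : (s.length + 1) * 2 ^ k - 1 + 1 = (s.length + 1) * 2 ^ k := by omega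
  rw [he]
  rw [if_pos (Nat.mul_mod_right _ _)]
  rw [Nat.mul_div_cancel_left _ (by omega : 0 < s.length + 1)]
  exact pv_pfold_two_pow k

theorem pv_rev_inv (s : List Char) (m : Nat) :
    (pvF s m).reverse.map pvInv = (List.range m).map (fun t => pvInv (pvBit s (m - 1 - t))) := by
  apply List.ext_getElem
  · simp [pv_F_length]
  · intro t h1 h2
    have htm : t < m := by simpa [pv_F_length] using h2
    simp only [List.getElem_map, List.getElem_reverse, List.getElem_range, pv_F_length]
    congr 1
    exact pv_F_getElem s m (m - 1 - t) (by omega)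

theorem pv_F_step (s : List Char) (k : Nat) :
    pvF s ((s.length + 1) * 2 ^ (k + 1) - 1) =
      pvF s ((s.length + 1) * 2 ^ k - 1) ++
        '0' :: ((pvF s ((s.length + 1) * 2 ^ k - 1)).reverse.map pvInv) := by
  set L := s.length with hL
  set m := (L + 1) * 2 ^ k - 1 with hm
  have hNpos : 1 ≤ (L + 1) * 2 ^ k := Nat.one_le_iff_ne_zero.mpr (by positivity)
  have hpow : (L + 1) * 2 ^ (k + 1) = 2 * ((L + 1) * 2 ^ k) := by rw [pow_succ]; ring
  have hlen : (L + 1) * 2 ^ (k + 1) - 1 = (m + 1) + m := by omega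
  rw [pv_rev_inv, pvF, hlen, List.range_add, List.map_append, List.range_succ,
    List.map_append, List.map_singleton]
  have hmid : pvBit s m = '0' := by rw [hm]; exact pv_bit_mid s k
  rw [hmid, List.append_assoc, List.singleton_append]
  congr 1
  congr 1
  rw [List.map_map]
  apply List.map_congr_left
  intro t htm
  rw [List.mem_range] at htm
  have hadd : m + 1 + t = (L + 1) * 2 ^ k + t := by omega
  have hsub : m - 1 - t = (L + 1) * 2 ^ k - 2 - t := by omega
  simp only [Function.comp_apply]
  rw [hadd, hsub]
  have hside : t + 2 ≤ (s.length + 1) * 2 ^ k := by rw [← hL]; omega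
  exact pv_bit_mirror s k t hside

theorem pv_bit_ne_two (s : List Char) (h2 : '2' ∉ s) (i : Nat) : pvBit s i ≠ '2' := by
  by_cases hm : (i + 1) % (s.length + 1) = 0
  · rw [pvBit, if_pos hm]
    rcases pv_pfold_binary ((i + 1) / (s.length + 1)) with h | h <;> rw [h] <;> decide
  · rw [pv_bit_else s i hm]
    have hdm := Nat.div_add_mod i (s.length + 1)
    have hjlt : i % (s.length + 1) < s.length := by
      have h1 : i % (s.length + 1) < s.length + 1 := Nat.mod_lt _ (by omega)
      have h2' : (i + 1) % (s.length + 1) = (i % (s.length + 1) + 1) % (s.length + 1) := by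
        conv_lhs => rw [show i + 1 = i % (s.length + 1) + 1 + (s.length + 1) * (i / (s.length + 1)) by omega]
        rw [Nat.add_mul_mod_self_left]
      by_contra hge
      apply hm
      rw [h2', show i % (s.length + 1) = s.length by omega, Nat.mod_self]
    have hmem : s.getD (i % (s.length + 1)) ' ' ∈ s := by
      rw [List.getD_eq_getElem s ' ' hjlt]; exact List.getElem_mem _
    have hmem' : s.getD (s.length - 1 - i % (s.length + 1)) ' ' ∈ s := by
      rw [List.getD_eq_getElem s ' ' (by omega)]; exact List.getElem_mem _
    split_ifs with hb
    · exact fun h => h2 (h ▸ hmem)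
    · exact pv_inv_ne_two _ (fun h => h2 (h ▸ hmem'))

theorem pv_growA_no2 (l : List Char) (h2 : '2' ∉ l) :
    pvGrowA l = l ++ '0' :: (l.reverse.map pvInv) := by
  rw [pv_growA_eq]
  congr 2
  apply List.map_congr_left
  intro c hc
  exact pv_mA_eq_inv c (fun h => h2 (h ▸ (List.mem_reverse.mp hc)))

theorem pv_growA_F (s : List Char) (h2 : '2' ∉ s) (k : Nat) :
    pvGrowA (pvF s ((s.length + 1) * 2 ^ k - 1)) = pvF s ((s.length + 1) * 2 ^ (k + 1) - 1) := by
  rw [pv_growA_no2, ← pv_F_step]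
  intro hmem
  rw [pvF, List.mem_map] at hmem
  obtain ⟨i, _, hbi⟩ := hmem
  exact pv_bit_ne_two s h2 i hbi

theorem pv_lock (s : List Char) (d : Int) (h2 : '2' ∉ s) :
    ∀ (fuel : Nat) (k : Nat), d - (((s.length + 1) * 2 ^ k - 1 : Nat) : Int) ≤ (fuel : Int) →
      pvLoopA fuel d (pvF s ((s.length + 1) * 2 ^ k - 1)) =
        pvF s (pvGrowLen fuel d ((s.length + 1) * 2 ^ k - 1)) := by
  intro fuel
  induction fuel with
  | zero => intro k _; rfl
  | succ f ih =>
    intro k hf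
    have hNpos : 1 ≤ (s.length + 1) * 2 ^ k := Nat.one_le_iff_ne_zero.mpr (by positivity)
    have hpow : (s.length + 1) * 2 ^ (k + 1) = 2 * ((s.length + 1) * 2 ^ k) := by
      rw [pow_succ]; ring
    simp only [pvLoopA, pvGrowLen, pv_F_length]
    by_cases hg : ((((s.length + 1) * 2 ^ k - 1 : Nat) : Int) < d)
    · rw [if_pos hg, if_pos hg, pv_growA_F s h2 k]
      have h21 : 2 * ((s.length + 1) * 2 ^ k - 1) + 1 = (s.length + 1) * 2 ^ (k + 1) - 1 := by
        omega
      rw [h21]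
      apply ih (k + 1)
      have : ((s.length + 1) * 2 ^ k - 1 : Nat) + 1 ≤ ((s.length + 1) * 2 ^ (k + 1) - 1 : Nat) := by
        omega
      push_cast at hf ⊢
      omega
    · rw [if_neg hg, if_neg hg]

theorem pv_loopA_stop (d : Int) (data : List Char) (h : ¬ ((data.length : Int) < d)) :
    ∀ fuel, pvLoopA fuel d data = data := by
  intro fuel
  cases fuel with
  | zero => rfl
  | succ f => simp only [pvLoopA, if_neg h]

theorem pv_growLen_stop (d : Int) (n : Nat) (h : ¬ ((n : Int) < d)) :
    ∀ fuel, pvGrowLen fuel d n = n := by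
  intro fuel
  cases fuel with
  | zero => rfl
  | succ f => simp only [pvGrowLen, if_neg h]

theorem pv_caseC (s : List Char) (d : Int) (hg : (s.length : Int) < d)
    (h2 : '2' ∈ s)
    (hbound : ∀ p : Nat, p < s.length → s.getD p ' ' = '2' → d ≤ 2 * (s.length : Int) - (p : Int)) :
    PySem.List.slice (pvLoopA (d - (s.length : Int)).toNat d s) none (some d) =
      PySem.List.slice (pvF s (pvGrowLen (d - (s.length : Int)).toNat d s.length)) none (some d) := by
  set L := s.length with hL
  obtain ⟨p0, hp0lt, hp0⟩ : ∃ p < L, s.getD p ' ' = '2' := by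
    obtain ⟨p, hp, hpe⟩ := List.getElem_of_mem h2
    exact ⟨p, hp, by rw [List.getD_eq_getElem s ' ' hp, hpe]⟩
  have hd2L : d ≤ 2 * (L : Int) := le_trans (hbound p0 hp0lt hp0) (by omega)
  have hL1 : 1 ≤ L := by
    rcases Nat.eq_zero_or_pos L with h0 | h1
    · rw [hL] at h0; rw [List.eq_nil_of_length_eq_zero h0] at h2; simp at h2
    · exact h1
  have hd0 : 0 ≤ d := by omega
  have hfuel : (d - (L : Int)).toNat = ((d - (L : Int)).toNat - 1) + 1 := by omega
  have hgrowlen : (pvGrowA s).length = 2 * L + 1 := by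
    rw [pv_growA_eq]; simp [hL]; omega
  -- A's loop runs exactly once
  have hA : pvLoopA (d - (L : Int)).toNat d s = pvGrowA s := by
    rw [hfuel]
    simp only [pvLoopA, ← hL, if_pos hg]
    exact pv_loopA_stop d _ (by rw [hgrowlen]; push_cast; omega) _
  -- B's length loop runs exactly once
  have hB : pvGrowLen (d - (L : Int)).toNat d L = 2 * L + 1 := by
    rw [hfuel]
    simp only [pvGrowLen, if_pos hg]
    exact pv_growLen_stop d _ (by push_cast; omega) _
  rw [hA, hB]
  -- unfold both grown strings into seed ++ '0' ++ inverted-reverse form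
  have hstep : pvF s (2 * L + 1) = s ++ '0' :: (s.reverse.map pvInv) := by
    have h1 : (L + 1) * 2 ^ (0 + 1) - 1 = 2 * L + 1 := by ring_nf; omega
    have h0 : (L + 1) * 2 ^ 0 - 1 = L := by simp
    have := pv_F_step s 0
    rw [h0, h1, hL] at this
    rw [hL, this, ← hL, pv_F_seed]
  rw [hstep, pv_growA_eq]
  rw [PySem.List.slice_to _ hd0, PySem.List.slice_to _ hd0]
  have htake : ∀ (f : Char → Char), List.take d.toNat (s ++ '0' :: (s.reverse.map f)) =
      s ++ '0' :: List.take (d.toNat - (L + 1)) (s.reverse.map f) := by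
    intro f
    rw [List.take_append, List.take_of_length_le (by rw [← hL]; omega), ← hL]
    congr 1
    rw [show d.toNat - L = (d.toNat - (L + 1)) + 1 by omega]
    rfl
  rw [htake, htake]
  congr 2
  apply List.ext_getElem
  · simp
  · intro t h1 h2'
    have htlt : t < d.toNat - (L + 1) := by
      simp only [List.length_take, List.length_map, List.length_reverse, ← hL] at h1
      omega
    have htL : t < L := by
      simp only [List.length_take, List.length_map, List.length_reverse, ← hL] at h1
      omega
    rw [List.getElem_take, List.getElem_take, List.getElem_map, List.getElem_map,
      List.getElem_reverse]
    have hcm : s[s.length - 1 - t]'(by omega) ∈ s := List.getElem_mem _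
    by_cases hc : s[s.length - 1 - t]'(by omega) = '2'
    · exfalso
      have := hbound (L - 1 - t) (by omega)
        (by rw [List.getD_eq_getElem s ' ' (by omega : L - 1 - t < L)]; exact hc)
      omega
    · exact pv_mA_eq_inv _ hc

theorem pvDGo_iff (l : List Char) : ∀ t : Int,
    pvDGo l t = true ↔ ∃ r < l.length, l.getD r ' ' = '2' ∧ t - (r : Int) < 0 := by
  induction l with
  | nil => intro t; simp [pvDGo]
  | cons c cs ih =>
    intro t
    simp only [pvDGo, Bool.or_eq_true, Bool.and_eq_true, beq_iff_eq, decide_eq_true_eq, ih]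
    constructor
    · rintro (⟨hc, ht⟩ | ⟨r, hr, hg, hlt⟩)
      · exact ⟨0, by simp, by simpa using hc, by omega⟩
      · exact ⟨r + 1, by simpa using hr, by simpa using hg, by push_cast; omega⟩
    · rintro ⟨r, hr, hg, hlt⟩
      cases r with
      | zero => exact Or.inl ⟨by simpa using hg, by omega⟩
      | succ r' =>
        right
        exact ⟨r', by simpa using hr, by simpa using hg, by push_cast at hlt; omega⟩

theorem pvD_iff (st : String) (d : Int) :
    D_generate_dragon_curve_data st d ↔
      ∃ p < st.toList.length, st.toList.getD p ' ' = '2' ∧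
        2 * (st.toList.length : Int) - (p : Int) < d := by
  rw [D_generate_dragon_curve_data, pvDGo_iff]
  exact exists_congr fun p => and_congr_right fun _ => and_congr_right fun _ => by omega

theorem pv_final (st : String) (d : Int) (hnd : ¬ D_generate_dragon_curve_data st d) :
    generate_dragon_curve_data st d = generate_dragon_curve_data_alt st d := by
  rw [generate_dragon_curve_data, generate_dragon_curve_data_alt]
  rw [pvD_iff] at hnd
  set s := st.toList with hs
  show String.ofList (PySem.List.slice (pvLoopA (d - (s.length : Int)).toNat d s) none (some d)) =
    String.ofList (PySem.List.slice (pvF s (pvGrowLen (d - (s.length : Int)).toNat d s.length)) none (some d))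
  by_cases h2 : '2' ∈ s
  · by_cases hg : (s.length : Int) < d
    · -- '2' in seed, growth happens: ¬D bounds disk_length below the first mangled position
      have hbound : ∀ p : Nat, p < s.length → s.getD p ' ' = '2' →
          d ≤ 2 * (s.length : Int) - (p : Int) := by
        intro p hp hpe
        by_contra hlt
        exact hnd ⟨p, hp, hpe, by omega⟩
      rw [pv_caseC s d hg h2 hbound]
    · -- no growth: both sides return the seed sliced
      rw [pv_loopA_stop d s hg, pv_growLen_stop d s.length hg, pv_F_seed]
  · -- seed free of '2': the two grow rules agree everywhere
    have h0 : (s.length + 1) * 2 ^ 0 - 1 = s.length := by simp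
    have := pv_lock s d h2 (d - (s.length : Int)).toNat 0
      (by rw [h0]; exact Int.self_le_toNat _)
    rw [h0] at this
    rw [pv_F_seed] at this
    rw [this]

-- ===== VERDICT =====

theorem generate_dragon_curve_data_spec : Claim_unchanged_generate_dragon_curve_data := by
  intro initial_state disk_length _ hnd
  exact pv_final initial_state disk_length hnd

theorem generate_dragon_curve_data_changed : Claim_changed_generate_dragon_curve_data := by
  unfold Claim_changed_generate_dragon_curve_data; decide
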